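-- pv_equiv track=rewrite | github.com/owen-yeung/Google-foobar | level3-3.py | n_stairs_with_height
-- ===== SOURCE A (Python) =====
-- def n_stairs_with_height(height, bricks):
--     '''
--     May have to add lookup for speed (use lookup if value exists, otherwise compute)
--     :param height:
--     :param bricks: ensure height < bricks
--     :return: 0 if no valid stairs
--     '''
--     # base case:
--     if bricks < 3:
--         return 0
--     # max height is bricks - 1
--     if height > bricks - 1:
--         return 0
--     if height <= 1:
--         return 0
--     count = 0
--     bricks_left = bricks - height
--     if height > bricks // 2:
--         for h in range(2, bricks):
--             count += n_stairs_with_height(h, bricks_left)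
--         return 1 + count
--     else:
--         for h in range(2, height):
--             count += n_stairs_with_height(h, bricks_left)
--         return count
-- ===== SOURCE B (Python) =====
-- def n_stairs_with_height(height, bricks):
--     memo = {}
--
--     def solve(h, b):
--         if b < 3 or h <= 1 or h > b - 1:
--             return 0
--         if (h, b) in memo:
--             return memo[(h, b)]
--         bl = b - h
--         if h > b // 2:
--             r = 1 + sum(solve(x, bl) for x in range(2, b))
--         else:
--             r = sum(solve(x, bl) for x in range(2, h))
--         memo[(h, b)] = r
--         return r
--
--     return solve(height, bricks)
-- ===== Notes on version B (the rewrite author's own statement) =====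
-- stated objective: alternative
-- what changed: B threads a memo dict through the recursion (top-down dynamic programming), computing each (height, bricks) subproblem once where A recomputes it exponentially often.
import Mathlib
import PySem

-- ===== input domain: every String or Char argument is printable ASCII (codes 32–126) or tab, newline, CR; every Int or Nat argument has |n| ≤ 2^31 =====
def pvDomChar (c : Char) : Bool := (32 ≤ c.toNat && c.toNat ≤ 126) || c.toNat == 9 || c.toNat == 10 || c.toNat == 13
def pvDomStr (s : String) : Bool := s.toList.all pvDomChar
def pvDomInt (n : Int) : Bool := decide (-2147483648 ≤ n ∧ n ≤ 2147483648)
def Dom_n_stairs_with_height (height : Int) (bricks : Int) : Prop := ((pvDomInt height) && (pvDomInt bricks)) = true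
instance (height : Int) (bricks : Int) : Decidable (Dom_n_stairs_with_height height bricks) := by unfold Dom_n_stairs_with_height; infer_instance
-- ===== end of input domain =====

-- B restructures A's naive recursion as top-down dynamic programming: a memo dict over the (height, bricks) subproblems, so each subproblem is computed once.

-- ===== PORT A =====
def n_stairs_with_height (height : Int) (bricks : Int) : Int :=
  if bricks < 3 then 0
  else if height > bricks - 1 then 0
  else if height ≤ 1 then 0
  else
    let bricks_left := bricks - height
    if height > PySem.Int.floordiv bricks 2 then
      1 + (PySem.List.pyRange 2 bricks 1).foldl
            (fun count h => count + n_stairs_with_height h bricks_left) 0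
    else
      (PySem.List.pyRange 2 height 1).foldl
            (fun count h => count + n_stairs_with_height h bricks_left) 0
termination_by bricks.toNat
decreasing_by all_goals omega

-- ===== PORT B =====
-- the inner closure `solve` of Source B, with the mutable dict `memo` threaded through
def solveB (memo : PySem.Dict (Int × Int) Int) (h b : Int) : Int × PySem.Dict (Int × Int) Int :=
  if b < 3 ∨ h ≤ 1 ∨ h > b - 1 then (0, memo)
  else
    match memo.get? (h, b) with
    | some v => (v, memo)
    | none =>
      let bl := b - h
      let p :=
        if h > PySem.Int.floordiv b 2 then
          let s := (PySem.List.pyRange 2 b 1).foldl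
              (fun acc x => let r := solveB acc.2 x bl; (acc.1 + r.1, r.2)) (0, memo)
          (1 + s.1, s.2)
        else
          (PySem.List.pyRange 2 h 1).foldl
              (fun acc x => let r := solveB acc.2 x bl; (acc.1 + r.1, r.2)) (0, memo)
      (p.1, p.2.insert (h, b) p.1)
termination_by b.toNat
decreasing_by all_goals omega

def n_stairs_with_height_alt (height : Int) (bricks : Int) : Int :=
  (solveB PySem.Dict.empty height bricks).1

-- ===== PRECONDITION & SPEC =====
def Spec_n_stairs_with_height (height : Int) (bricks : Int) (out : Int) : Prop := out = n_stairs_with_height_alt height bricks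
instance (height : Int) (bricks : Int) (out : Int) : Decidable (Spec_n_stairs_with_height height bricks out) := by unfold Spec_n_stairs_with_height; infer_instance

-- ===== CLAIM (what is proved, stated in full; the proofs are below) =====
def Claim_equal_n_stairs_with_height : Prop := ∀ (height : Int) (bricks : Int), Dom_n_stairs_with_height height bricks → Spec_n_stairs_with_height height bricks (n_stairs_with_height height bricks)

-- ===== LEMMAS AND PROOFS =====

-- cache invariant: every memoised entry is A's value at its key
def MemoInv (memo : PySem.Dict (Int × Int) Int) : Prop :=
  ∀ h b v : Int, memo.get? (h, b) = some v → v = n_stairs_with_height h b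

theorem foldl_add_F (bl : Int) (l : List Int) :
    l.foldl (fun count h => count + n_stairs_with_height h bl) 0
      = (l.map (fun h => n_stairs_with_height h bl)).sum := by
  rw [PySem.List.foldl_add]; simp

-- A's value where a guard fires
theorem F_zero (h b : Int) (hg : b < 3 ∨ h ≤ 1 ∨ h > b - 1) :
    n_stairs_with_height h b = 0 := by
  rw [n_stairs_with_height]
  split_ifs <;> first | rfl | (exfalso; omega)

-- A's value where no guard fires
theorem F_eq (h b : Int) (hg : ¬ (b < 3 ∨ h ≤ 1 ∨ h > b - 1)) :
    n_stairs_with_height h b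
      = if h > PySem.Int.floordiv b 2 then
          1 + ((PySem.List.pyRange 2 b 1).map (fun x => n_stairs_with_height x (b - h))).sum
        else
          ((PySem.List.pyRange 2 h 1).map (fun x => n_stairs_with_height x (b - h))).sum := by
  rw [n_stairs_with_height]
  rw [if_neg (by omega : ¬ b < 3), if_neg (by omega : ¬ h > b - 1), if_neg (by omega : ¬ h ≤ 1)]
  by_cases hc : h > PySem.Int.floordiv b 2
  · rw [if_pos hc, if_pos hc, foldl_add_F]
  · rw [if_neg hc, if_neg hc, foldl_add_F]

-- the summing loop, assuming solveB is correct at bricks value bl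
theorem loop_ok (bl : Int)
    (IH : ∀ (h : Int) (memo : PySem.Dict (Int × Int) Int), MemoInv memo →
      (solveB memo h bl).1 = n_stairs_with_height h bl ∧ MemoInv (solveB memo h bl).2) :
    ∀ (l : List Int) (a : Int) (memo : PySem.Dict (Int × Int) Int), MemoInv memo →
      (l.foldl (fun acc x => let r := solveB acc.2 x bl; (acc.1 + r.1, r.2)) (a, memo)).1
        = a + (l.map (fun x => n_stairs_with_height x bl)).sum
      ∧ MemoInv (l.foldl (fun acc x => let r := solveB acc.2 x bl; (acc.1 + r.1, r.2)) (a, memo)).2 := by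
  intro l
  induction l with
  | nil => intro a memo hm; simpa using hm
  | cons x t ih =>
    intro a memo hm
    simp only [List.foldl_cons, List.map_cons, List.sum_cons]
    obtain ⟨hv, hm'⟩ := IH x memo hm
    obtain ⟨h1, h2⟩ := ih (a + (solveB memo x bl).1) (solveB memo x bl).2 hm'
    exact ⟨h1.trans (by rw [hv]; ring), h2⟩

theorem solveB_correct : ∀ (n : Nat) (b : Int), b.toNat ≤ n →
    ∀ (h : Int) (memo : PySem.Dict (Int × Int) Int), MemoInv memo →
      (solveB memo h b).1 = n_stairs_with_height h b ∧ MemoInv (solveB memo h b).2 := by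
  intro n
  induction n with
  | zero =>
    intro b hb h memo hm
    have hg : b < 3 ∨ h ≤ 1 ∨ h > b - 1 := by omega
    rw [solveB, if_pos hg]
    exact ⟨(F_zero h b hg).symm, hm⟩
  | succ n ihn =>
    intro b hb h memo hm
    by_cases hg : b < 3 ∨ h ≤ 1 ∨ h > b - 1
    · rw [solveB, if_pos hg]
      exact ⟨(F_zero h b hg).symm, hm⟩
    · rw [solveB, if_neg hg]
      cases hmk : memo.get? (h, b) with
      | some v =>
        simp only []
        exact ⟨hm h b v hmk, hm⟩
      | none =>
        simp only []
        have hbl : (b - h).toNat ≤ n := by omega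
        have IH : ∀ (h' : Int) (memo' : PySem.Dict (Int × Int) Int), MemoInv memo' →
            (solveB memo' h' (b - h)).1 = n_stairs_with_height h' (b - h)
              ∧ MemoInv (solveB memo' h' (b - h)).2 := fun h' memo' hm' => ihn (b - h) hbl h' memo' hm'
        by_cases hc : h > PySem.Int.floordiv b 2
        · rw [if_pos hc]
          obtain ⟨hs1, hs2⟩ := loop_ok (b - h) IH (PySem.List.pyRange 2 b 1) 0 memo hm
          rw [zero_add] at hs1
          have hval : 1 + ((PySem.List.pyRange 2 b 1).foldl
              (fun acc x => let r := solveB acc.2 x (b - h); (acc.1 + r.1, r.2)) (0, memo)).1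
                = n_stairs_with_height h b := by
            rw [hs1, F_eq h b hg, if_pos hc]
          refine ⟨hval, ?_⟩
          intro h' b' v' hv'
          rw [PySem.Dict.get?_insert] at hv'
          by_cases hk : (h', b') = (h, b)
          · rw [if_pos hk] at hv'
            obtain ⟨rfl, rfl⟩ := Prod.mk.injEq .. ▸ hk
            rw [← hval]
            exact (Option.some.injEq .. ▸ hv').symm ▸ rfl
          · rw [if_neg hk] at hv'
            exact hs2 h' b' v' hv'
        · rw [if_neg hc]
          obtain ⟨hs1, hs2⟩ := loop_ok (b - h) IH (PySem.List.pyRange 2 h 1) 0 memo hm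
          rw [zero_add] at hs1
          have hval : ((PySem.List.pyRange 2 h 1).foldl
              (fun acc x => let r := solveB acc.2 x (b - h); (acc.1 + r.1, r.2)) (0, memo)).1
                = n_stairs_with_height h b := by
            rw [hs1, F_eq h b hg, if_neg hc]
          refine ⟨hval, ?_⟩
          intro h' b' v' hv'
          rw [PySem.Dict.get?_insert] at hv'
          by_cases hk : (h', b') = (h, b)
          · rw [if_pos hk] at hv'
            obtain ⟨rfl, rfl⟩ := Prod.mk.injEq .. ▸ hk
            rw [← hval]
            exact (Option.some.injEq .. ▸ hv').symm ▸ rfl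
          · rw [if_neg hk] at hv'
            exact hs2 h' b' v' hv'

-- ===== VERDICT (by name: the statement is the Claim_ definition above) =====
theorem n_stairs_with_height_spec : Claim_equal_n_stairs_with_height := by
  intro height bricks _
  unfold Spec_n_stairs_with_height n_stairs_with_height_alt
  have hempty : MemoInv PySem.Dict.empty := by
    intro h b v hv
    rw [PySem.Dict.get?_empty] at hv
    exact absurd hv (by simp)
  exact ((solveB_correct bricks.toNat bricks le_rfl height PySem.Dict.empty hempty).1).symm
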